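-- pv_equiv track=rewrite | github.com/gudonghee2000/Algorithm-python | BaekJoon/삼성 기출문제/21608-실패.py | answer
-- ===== SOURCE A (Python) =====
-- def second_condi(table, j, t, friend):
--     dx = [0, 0, 1, -1]
--     dy = [-1, 1, 0, 0]
--     cnt = 0
--     for i in range(4):
--         nx = j + dx[i]
--         ny = t + dy[i]
--         if nx < 0 or ny < 0 or nx >= len(table) or ny >= len(table):
--             continue
--         if table[nx][ny] == -1:
--             cnt += 1
--     return cnt
--
-- def first_condi(table, j, t, friend):
--     dx = [0, 0, 1, -1]
--     dy = [-1, 1, 0, 0]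
--     cnt = 0
--     for i in range(4):
--         nx = j + dx[i]
--         ny = t + dy[i]
--         if nx < 0 or ny < 0 or nx >= len(table) or ny >= len(table):
--             continue
--         if table[nx][ny] in friend:
--             cnt += 1
--     return cnt
--
-- def bfs(table, i):
--     start = i[0]
--     friend = list(i[1:len(i)])
--     first = 0
--     second = 0
--     r = []
--     c = []
--     blank = []
--     for j in range(len(table)):
--         for t in range(len(table)):
--             if table[j][t] == -1:
--                 first_cnt = first_condi(table, j, t, friend)
--                 if first_cnt != 0 and first < first_cnt:
--                     first = first_cnt
--     for j in range(len(table)):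
--         for t in range(len(table)):
--             if table[j][t] == -1:
--                 first_cnt = first_condi(table, j, t, friend)
--                 if first_cnt != 0 and first == first_cnt:
--                     r.append(j)
--                     c.append(t)
--     if len(r) == 1 and len(c) == 1:
--         return [r[0], c[0]]
--     if r == [] and c == []:
--         new_r, new_c = 0, 0
--         for j in range(len(table)):
--             for t in range(len(table)):
--                 if table[j][t] == -1:
--                     second_cnt = second_condi(table, j, t, friend)
--                     if second_cnt != 0 and second < second_cnt:
--                         new_r = j
--                         new_c = t
--                         second = second_cnt
--         return [new_r, new_c]
--     else:
--         dr, dc = r[0], c[0]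
--         for j in range(len(r)):
--             nr = r[j]
--             nc = c[j]
--             second_cnt = second_condi(table, nr, nc, friend)
--             if second_cnt != 0 and second < second_cnt:
--                 dr = nr
--                 dc = nc
--                 second = second_cnt
--
--         return [dr, dc]
--
-- def answer(N, input):
--     answer = 0
--     table = [[-1 for _ in range(N)] for _ in range(N)]
--
--     for i in input:
--         pos = bfs(table, i)
--         table[pos[0]][pos[1]] = i[0]
--     for x in range(len(table)):
--         for y in range(len(table)):
--             for i in input:
--                 start = i[0]
--                 friend = i[1:len(i)]
--                 if table[x][y] == start:
--                     dx = [1, -1, 0, 0]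
--                     dy = [0, 0, -1, 1]
--                     cnt = 0
--                     for i in range(4):
--                         nx = x + dx[i]
--                         ny = y + dy[i]
--                         if nx < 0 or ny < 0 or nx >= len(table) or ny >= len(table):
--                             continue
--                         if table[nx][ny] in friend:
--                             cnt += 1
--                     if cnt >= 1:
--                         answer += (10) ** (cnt - 1)
--                     break
--     return answer
-- ===== SOURCE B (Python) =====
-- def _key(table, x, y, friends):
--     # (matches-with-friends, empty-neighbours) for cell (x, y), one neighbour sweep
--     n = len(table)
--     fc = sc = 0
--     for nx, ny in ((x, y - 1), (x, y + 1), (x + 1, y), (x - 1, y)):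
--         if 0 <= nx < n and 0 <= ny < n:
--             v = table[nx][ny]
--             if v in friends:
--                 fc += 1
--             if v == -1:
--                 sc += 1
--     return fc, sc
--
-- def answer(N, input):
--     table = [[-1] * N for _ in range(N)]
--     # placement: one row-major pass per student, picking the lexicographic
--     # argmax of (friend-count, empty-neighbour-count); the strict '>' against
--     # the (0, 0) start reproduces the seat-(0,0) fallback when nothing scores.
--     for s in input:
--         friends = s[1:]
--         best_key, best_pos = (0, 0), (0, 0)
--         n = len(table)
--         for j in range(n):
--             for t in range(n):
--                 if table[j][t] == -1:
--                     k = _key(table, j, t, friends)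
--                     if k > best_key:
--                         best_key, best_pos = k, (j, t)
--         table[best_pos[0]][best_pos[1]] = s[0]
--     # scoring: first-match friend lists, one dict built once
--     friends = {}
--     for s in input:
--         friends.setdefault(s[0], s[1:])
--     total = 0
--     n = len(table)
--     for x in range(n):
--         for y in range(n):
--             fr = friends.get(table[x][y])
--             if fr is not None:
--                 cnt = 0
--                 for nx, ny in ((x, y - 1), (x, y + 1), (x + 1, y), (x - 1, y)):
--                     if 0 <= nx < n and 0 <= ny < n and table[nx][ny] in fr:
--                         cnt += 1
--                 if cnt >= 1:
--                     total += 10 ** (cnt - 1)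
--     return total
-- ===== Notes on version B (the rewrite author's own statement) =====
-- stated objective: alternative
-- what changed: Placement per student is a single row-major pass keeping the lexicographic argmax of (friend-count, empty-neighbour-count) with strict '>' against a (0,0)/(0,0) start, replacing A's staged scheme (full max scan, second candidate-collecting scan into row/column lists, then a third tie-break loop with 0/0 fallback); scoring replaces A's per-cell rescan of the whole input with a first-match dict start->friends built once.
import Mathlib
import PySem

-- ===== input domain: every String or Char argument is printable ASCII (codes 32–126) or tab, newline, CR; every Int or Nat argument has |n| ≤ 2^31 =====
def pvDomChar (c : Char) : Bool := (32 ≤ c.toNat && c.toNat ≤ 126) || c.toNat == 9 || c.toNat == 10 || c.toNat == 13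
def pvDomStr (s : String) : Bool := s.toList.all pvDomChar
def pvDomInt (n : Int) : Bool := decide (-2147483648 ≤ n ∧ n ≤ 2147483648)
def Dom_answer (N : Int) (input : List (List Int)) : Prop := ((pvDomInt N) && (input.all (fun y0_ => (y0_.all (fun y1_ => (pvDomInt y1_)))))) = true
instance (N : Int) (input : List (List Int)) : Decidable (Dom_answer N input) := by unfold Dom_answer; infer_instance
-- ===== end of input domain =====

-- B replaces A's staged placement (max scan, candidate-collecting scan, tie-break scan)
-- by a single row-major pass per student picking the lexicographic argmax of
-- (friend-count, empty-neighbour-count), and scores via a dict built once; same value.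

-- ===== PORT A =====
-- second_condi(table, j, t, friend)  (friend is unused in the Python, kept for arity)
def secondCondi (table : List (List Int)) (j t : Int) (_friend : List Int) : Int :=
  let dx : List Int := [0, 0, 1, -1]
  let dy : List Int := [-1, 1, 0, 0]
  (List.range 4).foldl (fun cnt i =>
    let nx := j + dx.getD i 0
    let ny := t + dy.getD i 0
    if nx < 0 ∨ ny < 0 ∨ (table.length : Int) ≤ nx ∨ (table.length : Int) ≤ ny then cnt
    else if PySem.List.pyGetD (PySem.List.pyGetD table nx []) ny 0 = -1 then cnt + 1 else cnt) 0

-- first_condi(table, j, t, friend)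
def firstCondi (table : List (List Int)) (j t : Int) (friend : List Int) : Int :=
  let dx : List Int := [0, 0, 1, -1]
  let dy : List Int := [-1, 1, 0, 0]
  (List.range 4).foldl (fun cnt i =>
    let nx := j + dx.getD i 0
    let ny := t + dy.getD i 0
    if nx < 0 ∨ ny < 0 ∨ (table.length : Int) ≤ nx ∨ (table.length : Int) ≤ ny then cnt
    else if PySem.List.pyGetD (PySem.List.pyGetD table nx []) ny 0 ∈ friend then cnt + 1 else cnt) 0

-- bfs(table, i): returns the 2-element list [row, col] the Python returns
-- (the Python binds start = i[0], which is unused; i = [] raises there and is outside Pre_)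
def bfsA (table : List (List Int)) (i : List Int) : List Int :=
  let friend := PySem.List.slice i (some 1) (some (i.length : Int))
  let n := table.length
  let first := (List.range n).foldl (fun first j =>
    (List.range n).foldl (fun first t =>
      if (table.getD j []).getD t 0 = -1 then
        let fc := firstCondi table (j : Int) (t : Int) friend
        if fc ≠ 0 ∧ first < fc then fc else first
      else first) first) 0
  let rc := (List.range n).foldl (fun rc j =>
    (List.range n).foldl (fun (rc : List Int × List Int) t =>
      if (table.getD j []).getD t 0 = -1 then
        let fc := firstCondi table (j : Int) (t : Int) friend
        if fc ≠ 0 ∧ first = fc then (rc.1 ++ [(j : Int)], rc.2 ++ [(t : Int)]) else rc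
      else rc) rc) (([], []) : List Int × List Int)
  let r := rc.1
  let c := rc.2
  if r.length = 1 ∧ c.length = 1 then [r.getD 0 0, c.getD 0 0]
  else if r = [] ∧ c = [] then
    let st := (List.range n).foldl (fun st j =>
      (List.range n).foldl (fun (st : Int × Int × Int) t =>
        if (table.getD j []).getD t 0 = -1 then
          let sc := secondCondi table (j : Int) (t : Int) friend
          if sc ≠ 0 ∧ st.2.2 < sc then ((j : Int), (t : Int), sc) else st
        else st) st) ((0, 0, 0) : Int × Int × Int)
    [st.1, st.2.1]
  else
    let dr := r.getD 0 0
    let dc := c.getD 0 0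
    let st := (List.range r.length).foldl (fun (st : Int × Int × Int) j =>
      let nr := r.getD j 0
      let nc := c.getD j 0
      let sc := secondCondi table nr nc friend
      if sc ≠ 0 ∧ st.2.2 < sc then (nr, nc, sc) else st) (dr, dc, 0)
    [st.1, st.2.1]

-- table[r][c] = v  (in-range whenever reached under Pre_)
def setCellA (table : List (List Int)) (r c v : Int) : List (List Int) :=
  PySem.List.pySetD table r (PySem.List.pySetD (PySem.List.pyGetD table r []) c v)

-- the inner 'for i in input: … break' of A's scoring loop: contribution of cell (x,y)
def scoreCellA (table : List (List Int)) (x y : Nat) : List (List Int) → Int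
  | [] => 0
  | i :: rest =>
    let start := PySem.List.pyGetD i 0 0
    let friend := PySem.List.slice i (some 1) (some (i.length : Int))
    if (table.getD x []).getD y 0 = start then
      let dx : List Int := [1, -1, 0, 0]
      let dy : List Int := [0, 0, -1, 1]
      let cnt := (List.range 4).foldl (fun (cnt : Int) k =>
        let nx := (x : Int) + dx.getD k 0
        let ny := (y : Int) + dy.getD k 0
        if nx < 0 ∨ ny < 0 ∨ (table.length : Int) ≤ nx ∨ (table.length : Int) ≤ ny then cnt
        else if PySem.List.pyGetD (PySem.List.pyGetD table nx []) ny 0 ∈ friend then cnt + 1 else cnt) 0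
      if 1 ≤ cnt then 10 ^ (cnt - 1).toNat else 0
    else scoreCellA table x y rest

def answer (N : Int) (input : List (List Int)) : Int :=
  let table0 := (PySem.List.pyRange 0 N 1).map (fun _ => (PySem.List.pyRange 0 N 1).map (fun _ => (-1 : Int)))
  let table := input.foldl (fun table i =>
    let pos := bfsA table i
    setCellA table (pos.getD 0 0) (pos.getD 1 0) (PySem.List.pyGetD i 0 0)) table0
  (List.range table.length).foldl (fun acc x =>
    (List.range table.length).foldl (fun acc y =>
      acc + scoreCellA table x y input) acc) 0

-- ===== PORT B =====
-- _key(table, x, y, friends): (friend matches, empty neighbours) in one neighbour sweep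
def keyB (table : List (List Int)) (x y : Int) (friends : List Int) : Int × Int :=
  [(x, y - 1), (x, y + 1), (x + 1, y), (x - 1, y)].foldl (fun (p : Int × Int) q =>
    if 0 ≤ q.1 ∧ q.1 < (table.length : Int) ∧ 0 ≤ q.2 ∧ q.2 < (table.length : Int) then
      ((if PySem.List.pyGetD (PySem.List.pyGetD table q.1 []) q.2 0 ∈ friends then p.1 + 1 else p.1),
       (if PySem.List.pyGetD (PySem.List.pyGetD table q.1 []) q.2 0 = -1 then p.2 + 1 else p.2))
    else p) (0, 0)

-- the scoring neighbour count of Source B (combined bounds-and-membership condition)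
def countB (table : List (List Int)) (x y : Int) (values : List Int) : Int :=
  [(x, y - 1), (x, y + 1), (x + 1, y), (x - 1, y)].foldl (fun cnt p =>
    if 0 ≤ p.1 ∧ p.1 < (table.length : Int) ∧ 0 ≤ p.2 ∧ p.2 < (table.length : Int) ∧
        PySem.List.pyGetD (PySem.List.pyGetD table p.1 []) p.2 0 ∈ values then cnt + 1 else cnt) 0

-- the per-student placement pass: row-major lexicographic argmax of _key, start (0,0)
def chooseB (table : List (List Int)) (s : List Int) : Int × Int :=
  let friends := PySem.List.slice s (some 1) none
  let n := table.length
  let st := (List.range n).foldl (fun st j =>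
    (List.range n).foldl (fun (st : (Int × Int) × (Int × Int)) t =>
      if (table.getD j []).getD t 0 = -1 then
        let k := keyB table (j : Int) (t : Int) friends
        if st.1.1 < k.1 ∨ (st.1.1 = k.1 ∧ st.1.2 < k.2) then (k, ((j : Int), (t : Int))) else st
      else st) st) ((((0, 0), (0, 0))) : (Int × Int) × (Int × Int))
  st.2

def setCellB (table : List (List Int)) (r c v : Int) : List (List Int) :=
  PySem.List.pySetD table r (PySem.List.pySetD (PySem.List.pyGetD table r []) c v)

-- friends = {}; for s in input: friends.setdefault(s[0], s[1:])
def buildDictB (input : List (List Int)) : PySem.Dict Int (List Int) :=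
  input.foldl (fun d s =>
    d.setdefault (PySem.List.pyGetD s 0 0) (PySem.List.slice s (some 1) none)) PySem.Dict.empty

def answer_alt (N : Int) (input : List (List Int)) : Int :=
  let table0 := (PySem.List.pyRange 0 N 1).map (fun _ => (PySem.List.pyRange 0 N 1).map (fun _ => (-1 : Int)))
  let table := input.foldl (fun table s =>
    let rc := chooseB table s
    setCellB table rc.1 rc.2 (PySem.List.pyGetD s 0 0)) table0
  let d := buildDictB input
  (List.range table.length).foldl (fun acc x =>
    (List.range table.length).foldl (fun acc y =>
      match d.get? ((table.getD x []).getD y 0) with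
      | none => acc
      | some fr =>
        let cnt := countB table (x : Int) (y : Int) fr
        if 1 ≤ cnt then acc + 10 ^ (cnt - 1).toNat else acc) acc) 0

-- ===== PRECONDITION & SPEC =====
-- Pre_ excludes exactly where the Python A raises: an empty student list (i[0] → IndexError)
-- and N ≤ 0 with a nonempty input (bfs's fallback indexes table[0] of an empty table → IndexError).
def Pre_answer (N : Int) (input : List (List Int)) : Prop :=
  (∀ i ∈ input, i ≠ []) ∧ (input = [] ∨ 1 ≤ N)
instance (N : Int) (input : List (List Int)) : Decidable (Pre_answer N input) := by
  unfold Pre_answer; infer_instance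

def pvWitness_answer : Int × List (List Int) := (2, [[1, 2], [2, 1]])

def Spec_answer (N : Int) (input : List (List Int)) (out : Int) : Prop := out = answer_alt N input
instance (N : Int) (input : List (List Int)) (out : Int) : Decidable (Spec_answer N input out) := by
  unfold Spec_answer; infer_instance

-- ===== CLAIM (what is proved, stated in full; the proofs are below) =====
def Claim_equal_answer : Prop := ∀ (N : Int) (input : List (List Int)), Dom_answer N input → Pre_answer N input → Spec_answer N input (answer N input)

-- ===== LEMMAS AND PROOFS =====

-- one neighbour step: A's negated-bounds guard equals B's positive guard
lemma stepIf (n nx ny c : Int) (m : Prop) [Decidable m] :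
    (if nx < 0 ∨ ny < 0 ∨ n ≤ nx ∨ n ≤ ny then c else if m then c + 1 else c)
    = if 0 ≤ nx ∧ nx < n ∧ 0 ≤ ny ∧ ny < n ∧ m then c + 1 else c := by
  by_cases hm : m <;> simp [hm] <;> split_ifs <;> omega

lemma firstCondi_eq (table : List (List Int)) (j t : Int) (friend : List Int) :
    firstCondi table j t friend = countB table j t friend := by
  simp only [firstCondi, countB, List.range_succ, List.range_zero, List.nil_append,
    List.cons_append, List.foldl_cons, List.foldl_nil, List.getD, List.getElem?_cons_zero,
    List.getElem?_cons_succ, Option.getD_some, add_zero, ← sub_eq_add_neg]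
  simp only [stepIf]

lemma secondCondi_eq (table : List (List Int)) (j t : Int) (friend : List Int) :
    secondCondi table j t friend = countB table j t [-1] := by
  simp only [secondCondi, countB, List.range_succ, List.range_zero, List.nil_append,
    List.cons_append, List.foldl_cons, List.foldl_nil, List.getD, List.getElem?_cons_zero,
    List.getElem?_cons_succ, Option.getD_some, add_zero, ← sub_eq_add_neg,
    List.mem_singleton]
  simp only [stepIf]

-- foldl of a componentwise pair step is the pair of foldls
lemma foldl_pair {α : Type} (f : Int → α → Int) (g : Int → α → Int) :
    ∀ (l : List α) (p : Int × Int),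
    l.foldl (fun p q => (f p.1 q, g p.2 q)) p = (l.foldl f p.1, l.foldl g p.2) := by
  intro l
  induction l with
  | nil => intro p; rfl
  | cons x xs ih => intro p; simp [ih]

-- keyB computes both neighbour counts at once
lemma keyB_eq (table : List (List Int)) (x y : Int) (friends : List Int) :
    keyB table x y friends = (countB table x y friends, countB table x y [-1]) := by
  unfold keyB countB
  rw [show (fun (p : Int × Int) (q : Int × Int) =>
      if 0 ≤ q.1 ∧ q.1 < (table.length : Int) ∧ 0 ≤ q.2 ∧ q.2 < (table.length : Int) then
        ((if PySem.List.pyGetD (PySem.List.pyGetD table q.1 []) q.2 0 ∈ friends then p.1 + 1 else p.1),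
         (if PySem.List.pyGetD (PySem.List.pyGetD table q.1 []) q.2 0 = -1 then p.2 + 1 else p.2))
      else p)
    = (fun (p : Int × Int) (q : Int × Int) =>
      ((if 0 ≤ q.1 ∧ q.1 < (table.length : Int) ∧ 0 ≤ q.2 ∧ q.2 < (table.length : Int) ∧
          PySem.List.pyGetD (PySem.List.pyGetD table q.1 []) q.2 0 ∈ friends then p.1 + 1 else p.1),
       (if 0 ≤ q.1 ∧ q.1 < (table.length : Int) ∧ 0 ≤ q.2 ∧ q.2 < (table.length : Int) ∧
          PySem.List.pyGetD (PySem.List.pyGetD table q.1 []) q.2 0 ∈ ([-1] : List Int) then p.2 + 1 else p.2)))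
    from by
      funext p q
      simp only [List.mem_singleton]
      split_ifs <;> simp_all]
  exact foldl_pair
    (fun a (q : Int × Int) => if 0 ≤ q.1 ∧ q.1 < (table.length : Int) ∧ 0 ≤ q.2 ∧ q.2 < (table.length : Int) ∧
      PySem.List.pyGetD (PySem.List.pyGetD table q.1 []) q.2 0 ∈ friends then a + 1 else a)
    (fun a (q : Int × Int) => if 0 ≤ q.1 ∧ q.1 < (table.length : Int) ∧ 0 ≤ q.2 ∧ q.2 < (table.length : Int) ∧
      PySem.List.pyGetD (PySem.List.pyGetD table q.1 []) q.2 0 ∈ ([-1] : List Int) then a + 1 else a)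
    [(x, y - 1), (x, y + 1), (x + 1, y), (x - 1, y)] (0, 0)

-- a filtered loop body is a fold over the filterMap
lemma filterMapFold {α β σ : Type} (P : α → Prop) [DecidablePred P] (h : α → β)
    (g : σ → β → σ) : ∀ (l : List α) (a : σ),
    l.foldl (fun a t => if P t then g a (h t) else a) a
      = (l.filterMap (fun t => if P t then some (h t) else none)).foldl g a := by
  intro l
  induction l with
  | nil => intro a; rfl
  | cons x xs ih =>
    intro a
    by_cases hx : P x <;> simp [hx, ih]

-- A's nested row/column scan is a fold over the flattened cell list
lemma nestedFold {β σ : Type} (m : Nat) (P : Nat → Nat → Prop) [∀ j t, Decidable (P j t)]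
    (h : Nat → Nat → β) (g : σ → β → σ) :
    ∀ (n : Nat) (init : σ),
    (List.range n).foldl (fun a j =>
        (List.range m).foldl (fun a t => if P j t then g a (h j t) else a) a) init
      = ((List.range n).flatMap (fun j =>
          (List.range m).filterMap (fun t => if P j t then some (h j t) else none))).foldl g init := by
  intro n
  induction n with
  | zero => intro a; rfl
  | succ k ih =>
    intro a
    simp only [List.range_succ, List.flatMap_append, List.foldl_append, ih,
      List.flatMap_cons, List.flatMap_nil, List.append_nil]
    exact filterMapFold (P k) (h k) g (List.range m) _

-- the strict-improvement max loop is a max fold, for nonnegative data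
lemma maxFold (f : Int × Int × Int × Int → Int) :
    ∀ (l : List (Int × Int × Int × Int)) (a : Int), 0 ≤ a → (∀ e ∈ l, 0 ≤ f e) →
    l.foldl (fun a e => if f e ≠ 0 ∧ a < f e then f e else a) a
      = l.foldl (fun m e => max m (f e)) a := by
  intro l
  induction l with
  | nil => intro a _ _; rfl
  | cons e l ih =>
    intro a ha hl
    have he : 0 ≤ f e := hl e (by simp)
    have hstep : (if f e ≠ 0 ∧ a < f e then f e else a) = max a (f e) := by
      split_ifs <;> omega
    simp only [List.foldl_cons, hstep]
    exact ih _ (by omega) (fun x hx => hl x (by simp [hx]))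

-- the two parallel appends build the filtered projections
lemma rcFold (P : Int × Int × Int × Int → Prop) [DecidablePred P] :
    ∀ (l : List (Int × Int × Int × Int)) (r c : List Int),
    l.foldl (fun (a : List Int × List Int) e =>
        if P e then (a.1 ++ [e.1], a.2 ++ [e.2.1]) else a) (r, c)
      = (r ++ (l.filter (fun e => decide (P e))).map (·.1),
         c ++ (l.filter (fun e => decide (P e))).map (·.2.1)) := by
  intro l
  induction l with
  | nil => intro r c; simp
  | cons e l ih =>
    intro r c
    by_cases he : P e <;> simp [he, ih]

-- 'for j in range(len(l)): … l[j] …' is a fold over l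
lemma rangeGetDFold {α σ : Type} (d : α) (k : σ → α → σ) :
    ∀ (l : List α) (a : σ),
    (List.range l.length).foldl (fun a j => k a (l.getD j d)) a = l.foldl k a := by
  intro l
  induction l using List.reverseRecOn with
  | nil => intro a; rfl
  | append_singleton l x ih =>
    intro a
    simp only [List.length_append, List.length_singleton, List.range_succ, List.foldl_append,
      List.foldl_cons, List.foldl_nil]
    have h1 : List.foldl (fun a j => k a ((l ++ [x]).getD j d)) a (List.range l.length)
        = List.foldl (fun a j => k a (l.getD j d)) a (List.range l.length) :=
      PySem.List.foldl_congr_mem _ _ _ _ (by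
        intro acc j hj
        simp only [List.mem_range] at hj
        simp [List.getD_eq_getElem?_getD, List.getElem?_append_left hj])
    rw [h1, ih]
    congr 1
    simp [List.getD_eq_getElem?_getD]

-- i[1:len(i)] and i[1:] are the same list
lemma slice_all (i : List Int) :
    PySem.List.slice i (some 1) (some (i.length : Int)) = PySem.List.slice i (some 1) none := by
  rw [PySem.List.slice_toNat _ (by norm_num) (Int.natCast_nonneg _),
    PySem.List.slice_from _ (by norm_num)]
  simp only [Int.toNat_natCast, Int.toNat_one]
  exact List.take_of_length_le (by simp)

-- the first-match scan of input equals the setdefault dict lookup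
lemma firstTail_eq (v : Int) :
    ∀ (input : List (List Int)) (d : PySem.Dict Int (List Int)),
    (input.foldl (fun d s =>
      d.setdefault (PySem.List.pyGetD s 0 0) (PySem.List.slice s (some 1) none)) d).get? v
    = ((d.get? v).orElse (fun _ =>
        (input.find? (fun s => PySem.List.pyGetD s 0 0 == v)).map
          (fun s => PySem.List.slice s (some 1) none))) := by
  intro input
  induction input with
  | nil =>
    intro d
    simp only [List.foldl_nil, List.find?_nil, Option.map_none]
    cases d.get? v <;> rfl
  | cons s rest ih =>
    intro d
    simp only [List.foldl_cons, ih]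
    by_cases hk : PySem.List.pyGetD s 0 0 = v
    · rw [List.find?_cons_of_pos (by simp [hk]), ← hk, PySem.Dict.get?_setdefault_self]
      cases h : d.get? (PySem.List.pyGetD s 0 0) <;> simp [Option.orElse]
    · rw [List.find?_cons_of_neg (by simp [hk]),
        PySem.Dict.get?_setdefault_of_ne _ _ (fun h => hk h.symm)]

lemma buildDict_get? (input : List (List Int)) (v : Int) :
    (buildDictB input).get? v
    = (input.find? (fun s => PySem.List.pyGetD s 0 0 == v)).map
        (fun s => PySem.List.slice s (some 1) none) := by
  unfold buildDictB
  rw [firstTail_eq]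
  simp [PySem.Dict.get?_empty, Option.orElse]

-- A's inline neighbour count while scoring (order E,W,N,S) equals B's count (order N,S,E,W)
lemma scoreCnt_eq (table : List (List Int)) (x y : Nat) (fr : List Int) :
    (List.range 4).foldl (fun (cnt : Int) k =>
      let nx := (x : Int) + [1, -1, 0, 0].getD k 0
      let ny := (y : Int) + [0, 0, -1, 1].getD k 0
      if nx < 0 ∨ ny < 0 ∨ (table.length : Int) ≤ nx ∨ (table.length : Int) ≤ ny then cnt
      else if PySem.List.pyGetD (PySem.List.pyGetD table nx []) ny 0 ∈ fr then cnt + 1 else cnt) 0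
    = countB table (x : Int) (y : Int) fr := by
  simp only [countB, List.range_succ, List.range_zero, List.nil_append, List.cons_append,
    List.foldl_cons, List.foldl_nil, List.getD, List.getElem?_cons_zero, List.getElem?_cons_succ,
    Option.getD_some, add_zero, ← sub_eq_add_neg]
  simp only [stepIf]
  split_ifs <;> omega

-- per-cell agreement: the break-scan over input is the first-match lookup
lemma scoreCellA_find (table : List (List Int)) (x y : Nat) :
    ∀ (input : List (List Int)),
    scoreCellA table x y input
    = (match (input.find? (fun s => PySem.List.pyGetD s 0 0 == (table.getD x []).getD y 0)).map
          (fun s => PySem.List.slice s (some 1) none) with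
       | none => (0 : Int)
       | some fr =>
         if 1 ≤ countB table (x : Int) (y : Int) fr
         then 10 ^ (countB table (x : Int) (y : Int) fr - 1).toNat else 0) := by
  intro input
  induction input with
  | nil => simp [scoreCellA]
  | cons i rest ih =>
    by_cases h : (table.getD x []).getD y 0 = PySem.List.pyGetD i 0 0
    · rw [List.find?_cons_of_pos (by simp only [beq_iff_eq]; exact h.symm)]
      simp only [scoreCellA, if_pos h, slice_all, scoreCnt_eq, Option.map_some]
    · rw [List.find?_cons_of_neg (by simp only [beq_iff_eq]; exact fun hh => h (Eq.symm hh))]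
      simp only [scoreCellA, if_neg h, ih]

-- countB is a count of at most four neighbours
lemma countB_bounds (table : List (List Int)) (x y : Int) (vals : List Int) :
    0 ≤ countB table x y vals ∧ countB table x y vals ≤ 4 := by
  simp only [countB, List.foldl_cons, List.foldl_nil]
  split_ifs <;> omega

-- two parallel indexed reads r[j], c[j] over the projections of one tuple list
lemma rangeGetD2Fold {σ : Type} (f g : Int × Int × Int × Int → Int) (k : σ → Int → Int → σ)
    (l : List (Int × Int × Int × Int)) (a : σ) :
    (List.range l.length).foldl (fun a j => k a ((l.map f).getD j 0) ((l.map g).getD j 0)) a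
    = l.foldl (fun a e => k a (f e) (g e)) a := by
  have h1 : (List.range l.length).foldl (fun a j => k a ((l.map f).getD j 0) ((l.map g).getD j 0)) a
      = (List.range l.length).foldl (fun a j =>
          (fun a (p : Int × Int) => k a p.1 p.2) a ((l.map (fun e => (f e, g e))).getD j (0, 0))) a :=
    PySem.List.foldl_congr_mem _ _ _ _ (by
      intro acc j hj
      simp only [List.mem_range] at hj
      simp [hj])
  rw [h1]
  have h2 := rangeGetDFold ((0 : Int), (0 : Int)) (fun a (p : Int × Int) => k a p.1 p.2)
    (l.map (fun e => (f e, g e))) a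
  rw [List.length_map] at h2
  rw [h2, List.foldl_map]

-- the flattened list of empty cells with both neighbour counts
def cellsOf (table : List (List Int)) (F : List Int) : List (Int × Int × Int × Int) :=
  (List.range table.length).flatMap (fun j => (List.range table.length).filterMap (fun t =>
    if (table.getD j []).getD t 0 = -1 then
      some (((j : Nat) : Int), ((t : Nat) : Int), countB table (j : Int) (t : Int) F,
        countB table (j : Int) (t : Int) [-1]) else none))

lemma mem_cellsOf (table : List (List Int)) (F : List Int) (e : Int × Int × Int × Int)
    (he : e ∈ cellsOf table F) :
    e.2.2.1 = countB table e.1 e.2.1 F ∧ e.2.2.2 = countB table e.1 e.2.1 [-1] := by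
  simp only [cellsOf, List.mem_flatMap, List.mem_filterMap] at he
  obtain ⟨j, -, t, -, ht⟩ := he
  split_ifs at ht with hc
  · cases ht; exact ⟨rfl, rfl⟩

-- max fold and strict-argmax fold, with a first-attaining-max characterisation
def mfoldC (key : Int × Int × Int × Int → Int) (v0 : Int) (l : List (Int × Int × Int × Int)) : Int :=
  l.foldl (fun a e => max a (key e)) v0

def sfoldC (key : Int × Int × Int × Int → Int) (b : (Int × Int) × Int)
    (l : List (Int × Int × Int × Int)) : (Int × Int) × Int :=
  l.foldl (fun st e => if st.2 < key e then ((e.1, e.2.1), key e) else st) b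

lemma mfold_ge_init (key : Int × Int × Int × Int → Int) :
    ∀ (l : List (Int × Int × Int × Int)) (v0 : Int), v0 ≤ mfoldC key v0 l := by
  intro l
  induction l with
  | nil => intro v0; exact le_rfl
  | cons x xs ih =>
    intro v0
    exact le_trans (le_max_left v0 (key x)) (ih (max v0 (key x)))

lemma mfold_ge_mem (key : Int × Int × Int × Int → Int) :
    ∀ (l : List (Int × Int × Int × Int)) (v0 : Int) (e : Int × Int × Int × Int),
    e ∈ l → key e ≤ mfoldC key v0 l := by
  intro l
  induction l with
  | nil => intro v0 e he; cases he
  | cons x xs ih =>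
    intro v0 e he
    rcases List.mem_cons.mp he with h | h
    · subst h
      exact le_trans (le_max_right v0 (key e)) (mfold_ge_init key xs _)
    · exact ih _ e h

lemma mfold_le_bound (key : Int × Int × Int × Int → Int) (B : Int) :
    ∀ (l : List (Int × Int × Int × Int)) (v0 : Int), v0 ≤ B → (∀ e ∈ l, key e ≤ B) →
    mfoldC key v0 l ≤ B := by
  intro l
  induction l with
  | nil => intro v0 h _; exact h
  | cons x xs ih =>
    intro v0 h hl
    have hx := hl x (by simp)
    simp only [mfoldC, List.foldl_cons]
    exact ih (max v0 (key x)) (by omega) (fun e he => hl e (by simp [he]))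

lemma mfold_attained (key : Int × Int × Int × Int → Int) :
    ∀ (l : List (Int × Int × Int × Int)) (v0 : Int),
    mfoldC key v0 l = v0 ∨ ∃ e ∈ l, key e = mfoldC key v0 l := by
  intro l
  induction l with
  | nil => intro v0; exact Or.inl rfl
  | cons x xs ih =>
    intro v0
    rcases ih (max v0 (key x)) with h | ⟨e, he, hk⟩
    · rcases le_total v0 (key x) with hc | hc
      · right
        exact ⟨x, by simp, by simp only [mfoldC, List.foldl_cons] at h ⊢; omega⟩
      · left
        simp only [mfoldC, List.foldl_cons] at h ⊢; omega
    · right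
      exact ⟨e, by simp [he], hk⟩

lemma sfold_val (key : Int × Int × Int × Int → Int) :
    ∀ (l : List (Int × Int × Int × Int)) (b : (Int × Int) × Int),
    (sfoldC key b l).2 = mfoldC key b.2 l := by
  intro l
  induction l with
  | nil => intro b; rfl
  | cons x xs ih =>
    intro b
    simp only [sfoldC, mfoldC, List.foldl_cons] at *
    by_cases h : b.2 < key x
    · rw [if_pos h, ih]
      congr 1
      omega
    · rw [if_neg h, ih]
      congr 1
      omega

lemma sfold_find (key : Int × Int × Int × Int → Int) :
    ∀ (l : List (Int × Int × Int × Int)) (p0 : Int × Int) (v0 : Int),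
    sfoldC key (p0, v0) l
    = match l.find? (fun e => decide (mfoldC key v0 l = key e ∧ v0 < key e)) with
      | none => (p0, v0)
      | some e => ((e.1, e.2.1), key e) := by
  intro l
  induction l using List.reverseRecOn with
  | nil => intro p0 v0; rfl
  | append_singleton l x ih =>
    intro p0 v0
    have hm : mfoldC key v0 (l ++ [x]) = max (mfoldC key v0 l) (key x) := by
      simp [mfoldC]
    have hval : (sfoldC key (p0, v0) l).2 = mfoldC key v0 l := sfold_val key l (p0, v0)
    have hstep : sfoldC key (p0, v0) (l ++ [x])
        = (if (sfoldC key (p0, v0) l).2 < key x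
           then ((x.1, x.2.1), key x) else sfoldC key (p0, v0) l) := by
      simp [sfoldC]
    by_cases hx : mfoldC key v0 l < key x
    · -- x is a strictly new maximum
      rw [hstep, hval, if_pos hx, hm]
      have hmax : max (mfoldC key v0 l) (key x) = key x := by omega
      rw [hmax]
      have hnone : l.find? (fun e => decide (key x = key e ∧ v0 < key e)) = none := by
        apply List.find?_eq_none.mpr
        intro e he
        have := mfold_ge_mem key l v0 e he
        simp only [decide_eq_true_eq, not_and]
        intro h1 _
        omega
      rw [List.find?_append, hnone]
      have hin : v0 ≤ mfoldC key v0 l := mfold_ge_init key l v0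
      simp [List.find?, show (key x = key x ∧ v0 < key x) from ⟨rfl, by omega⟩]
    · -- key x does not improve the maximum
      rw [hstep, hval, if_neg hx, hm]
      have hmax : max (mfoldC key v0 l) (key x) = mfoldC key v0 l := by omega
      rw [hmax, List.find?_append]
      cases hf : l.find? (fun e => decide (mfoldC key v0 l = key e ∧ v0 < key e)) with
      | some e => rw [ih p0 v0, hf]; rfl
      | none =>
        rw [ih p0 v0, hf]
        -- no attaining element in l: the max must be v0, so x cannot qualify either
        have hv : mfoldC key v0 l = v0 := by
          rcases mfold_attained key l v0 with h | ⟨e, he, hk⟩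
          · exact h
          · by_cases hlt : v0 < mfoldC key v0 l
            · exfalso
              have := List.find?_eq_none.mp hf e he
              simp only [decide_eq_true_eq, not_and] at this
              exact this hk.symm (by omega)
            · have := mfold_ge_init key l v0
              omega
        have : ¬ (mfoldC key v0 l = key x ∧ v0 < key x) := by
          rw [hv]; omega
        simp [List.find?, this]

-- find? only depends on the predicate's values on members
lemma find?_congr_mem {α : Type} (p q : α → Bool) :
    ∀ (l : List α), (∀ x ∈ l, p x = q x) → l.find? p = l.find? q := by
  intro l
  induction l with
  | nil => intro _; rfl
  | cons x xs ih =>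
    intro h
    have hx := h x (by simp)
    cases hq : q x with
    | true => rw [List.find?_cons_of_pos (hx ▸ hq), List.find?_cons_of_pos hq]
    | false =>
      rw [List.find?_cons_of_neg (by simp [hx, hq]), List.find?_cons_of_neg (by simp [hq])]
      exact ih (fun e he => h e (by simp [he]))

-- A's guarded triple-state argmax loop is sfoldC, for nonnegative keys
lemma tripleFold (key : Int × Int × Int × Int → Int) :
    ∀ (l : List (Int × Int × Int × Int)) (r c v0 : Int), 0 ≤ v0 → (∀ e ∈ l, 0 ≤ key e) →
    l.foldl (fun (st : Int × Int × Int) e =>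
        if key e ≠ 0 ∧ st.2.2 < key e then (e.1, e.2.1, key e) else st) (r, c, v0)
    = ((sfoldC key ((r, c), v0) l).1.1, (sfoldC key ((r, c), v0) l).1.2,
       (sfoldC key ((r, c), v0) l).2) := by
  intro l
  induction l with
  | nil => intro r c v0 _ _; rfl
  | cons e l ih =>
    intro r c v0 hv hl
    have he : 0 ≤ key e := hl e (by simp)
    have hg : (key e ≠ 0 ∧ v0 < key e) ↔ (v0 < key e) := by omega
    simp only [List.foldl_cons, sfoldC] at *
    by_cases h : v0 < key e
    · rw [if_pos (hg.mpr h), if_pos h]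
      exact ih e.1 e.2.1 (key e) (by omega) (fun x hx => hl x (by simp [hx]))
    · rw [if_neg (fun hc => h (hg.mp hc)), if_neg h]
      exact ih r c v0 hv (fun x hx => hl x (by simp [hx]))

-- B's lexicographic argmax pass is sfoldC under the 5·fc + sc encoding
lemma lexFold :
    ∀ (l : List (Int × Int × Int × Int)) (k1 k2 : Int) (p : Int × Int),
    0 ≤ k1 → 0 ≤ k2 → k2 ≤ 4 →
    (∀ e ∈ l, 0 ≤ e.2.2.1 ∧ 0 ≤ e.2.2.2 ∧ e.2.2.2 ≤ 4) →
    (l.foldl (fun (st : (Int × Int) × (Int × Int)) e =>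
        if st.1.1 < e.2.2.1 ∨ (st.1.1 = e.2.2.1 ∧ st.1.2 < e.2.2.2)
        then (e.2.2, (e.1, e.2.1)) else st) ((k1, k2), p)).2
    = (sfoldC (fun e => 5 * e.2.2.1 + e.2.2.2) (p, 5 * k1 + k2) l).1 := by
  intro l
  induction l with
  | nil => intro k1 k2 p _ _ _ _; rfl
  | cons e l ih =>
    intro k1 k2 p h1 h2 h3 hl
    obtain ⟨hf, hs, hs4⟩ := hl e (by simp)
    have hcond : (k1 < e.2.2.1 ∨ (k1 = e.2.2.1 ∧ k2 < e.2.2.2))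
        ↔ (5 * k1 + k2 < 5 * e.2.2.1 + e.2.2.2) := by omega
    simp only [List.foldl_cons, sfoldC] at *
    by_cases h : 5 * k1 + k2 < 5 * e.2.2.1 + e.2.2.2
    · rw [if_pos (hcond.mpr h), if_pos h]
      have := ih e.2.2.1 e.2.2.2 (e.1, e.2.1) hf hs hs4
        (fun x hx => hl x (by simp [hx]))
      exact this
    · rw [if_neg (fun hc => h (hcond.mp hc)), if_neg h]
      exact ih k1 k2 p h1 h2 h3 (fun x hx => hl x (by simp [hx]))

lemma firstNested (table : List (List Int)) (F : List Int) (init : Int) :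
    (List.range table.length).foldl (fun first j =>
      (List.range table.length).foldl (fun first t =>
        if (table.getD j []).getD t 0 = -1 then
          if countB table (j : Int) (t : Int) F ≠ 0 ∧ first < countB table (j : Int) (t : Int) F
          then countB table (j : Int) (t : Int) F else first
        else first) first) init
    = (cellsOf table F).foldl (fun a e => if e.2.2.1 ≠ 0 ∧ a < e.2.2.1 then e.2.2.1 else a) init :=
  nestedFold (σ := Int) table.length (fun j t => (table.getD j []).getD t 0 = -1)
    (fun j t => (((j : Nat) : Int), ((t : Nat) : Int), countB table (j : Int) (t : Int) F,
      countB table (j : Int) (t : Int) [-1]))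
    (fun a e => if e.2.2.1 ≠ 0 ∧ a < e.2.2.1 then e.2.2.1 else a) table.length init

lemma rcNested (table : List (List Int)) (F : List Int) (fst : Int) (init : List Int × List Int) :
    (List.range table.length).foldl (fun rc j =>
      (List.range table.length).foldl (fun (rc : List Int × List Int) t =>
        if (table.getD j []).getD t 0 = -1 then
          if countB table (j : Int) (t : Int) F ≠ 0 ∧ fst = countB table (j : Int) (t : Int) F
          then (rc.1 ++ [(j : Int)], rc.2 ++ [(t : Int)]) else rc
        else rc) rc) init
    = (cellsOf table F).foldl
        (fun a e => if e.2.2.1 ≠ 0 ∧ fst = e.2.2.1 then (a.1 ++ [e.1], a.2 ++ [e.2.1]) else a) init :=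
  nestedFold (σ := List Int × List Int) table.length (fun j t => (table.getD j []).getD t 0 = -1)
    (fun j t => (((j : Nat) : Int), ((t : Nat) : Int), countB table (j : Int) (t : Int) F,
      countB table (j : Int) (t : Int) [-1]))
    (fun a e => if e.2.2.1 ≠ 0 ∧ fst = e.2.2.1 then (a.1 ++ [e.1], a.2 ++ [e.2.1]) else a)
    table.length init

lemma secondNested (table : List (List Int)) (F : List Int) (init : Int × Int × Int) :
    (List.range table.length).foldl (fun st j =>
      (List.range table.length).foldl (fun (st : Int × Int × Int) t =>
        if (table.getD j []).getD t 0 = -1 then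
          if countB table (j : Int) (t : Int) [-1] ≠ 0 ∧ st.2.2 < countB table (j : Int) (t : Int) [-1]
          then ((j : Int), (t : Int), countB table (j : Int) (t : Int) [-1]) else st
        else st) st) init
    = (cellsOf table F).foldl
        (fun st e => if e.2.2.2 ≠ 0 ∧ st.2.2 < e.2.2.2 then (e.1, e.2.1, e.2.2.2) else st) init :=
  nestedFold (σ := Int × Int × Int) table.length (fun j t => (table.getD j []).getD t 0 = -1)
    (fun j t => (((j : Nat) : Int), ((t : Nat) : Int), countB table (j : Int) (t : Int) F,
      countB table (j : Int) (t : Int) [-1]))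
    (fun st e => if e.2.2.2 ≠ 0 ∧ st.2.2 < e.2.2.2 then (e.1, e.2.1, e.2.2.2) else st)
    table.length init

lemma lexNested (table : List (List Int)) (F : List Int) (init : (Int × Int) × (Int × Int)) :
    (List.range table.length).foldl (fun st j =>
      (List.range table.length).foldl (fun (st : (Int × Int) × (Int × Int)) t =>
        if (table.getD j []).getD t 0 = -1 then
          if st.1.1 < countB table (j : Int) (t : Int) F ∨
              (st.1.1 = countB table (j : Int) (t : Int) F ∧ st.1.2 < countB table (j : Int) (t : Int) [-1])
          then ((countB table (j : Int) (t : Int) F, countB table (j : Int) (t : Int) [-1]), ((j : Int), (t : Int)))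
          else st
        else st) st) init
    = (cellsOf table F).foldl
        (fun st e => if st.1.1 < e.2.2.1 ∨ (st.1.1 = e.2.2.1 ∧ st.1.2 < e.2.2.2)
          then (e.2.2, (e.1, e.2.1)) else st) init :=
  nestedFold (σ := (Int × Int) × (Int × Int)) table.length (fun j t => (table.getD j []).getD t 0 = -1)
    (fun j t => (((j : Nat) : Int), ((t : Nat) : Int), countB table (j : Int) (t : Int) F,
      countB table (j : Int) (t : Int) [-1]))
    (fun st e => if st.1.1 < e.2.2.1 ∨ (st.1.1 = e.2.2.1 ∧ st.1.2 < e.2.2.2)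
      then (e.2.2, (e.1, e.2.1)) else st) table.length init

set_option maxHeartbeats 2000000 in
lemma bfs_eq (table : List (List Int)) (i : List Int) :
    bfsA table i = [(chooseB table i).1, (chooseB table i).2] := by
  simp only [bfsA, chooseB, slice_all, firstCondi_eq, secondCondi_eq, keyB_eq]
  rw [firstNested table (PySem.List.slice i (some 1) none) 0]
  set F := PySem.List.slice i (some 1) none with hF
  set fst := (cellsOf table F).foldl
    (fun a e => if e.2.2.1 ≠ 0 ∧ a < e.2.2.1 then e.2.2.1 else a) 0 with hfst
  rw [rcNested table F fst ([], []),
    secondNested table F (0, 0, 0),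
    lexNested table F ((0, 0), (0, 0)),
    rcFold (fun e => e.2.2.1 ≠ 0 ∧ fst = e.2.2.1) (cellsOf table F) [] []]
  simp only [List.nil_append, List.length_map, List.map_eq_nil_iff]
  set E := cellsOf table F with hE
  set filt := E.filter (fun e => decide (e.2.2.1 ≠ 0 ∧ fst = e.2.2.1)) with hfilt
  -- basic facts
  have hbE : ∀ e ∈ E, 0 ≤ e.2.2.1 ∧ e.2.2.1 ≤ 4 ∧ 0 ≤ e.2.2.2 ∧ e.2.2.2 ≤ 4 := by
    intro e he
    obtain ⟨h1, h2⟩ := mem_cellsOf table F e (hE ▸ he)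
    obtain ⟨a1, a2⟩ := countB_bounds table e.1 e.2.1 F
    obtain ⟨b1, b2⟩ := countB_bounds table e.1 e.2.1 [-1]
    omega
  have hfiltmem : ∀ e ∈ filt, e ∈ E ∧ e.2.2.1 ≠ 0 ∧ fst = e.2.2.1 := by
    intro e he
    rw [hfilt, List.mem_filter] at he
    exact ⟨he.1, by simpa using he.2⟩
  have hfstm : fst = mfoldC (fun e => e.2.2.1) 0 E := by
    rw [hfst]
    exact maxFold (fun e => e.2.2.1) E 0 le_rfl (fun e he => (hbE e (hE ▸ he)).1)
  -- B's pass as a strict argmax in the 5·fc+sc encoding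
  have hB : (E.foldl (fun (st : (Int × Int) × (Int × Int)) e =>
        if st.1.1 < e.2.2.1 ∨ (st.1.1 = e.2.2.1 ∧ st.1.2 < e.2.2.2)
        then (e.2.2, (e.1, e.2.1)) else st) ((0, 0), (0, 0))).2
      = (sfoldC (fun e => 5 * e.2.2.1 + e.2.2.2) ((0, 0), 5 * 0 + 0) E).1 :=
    lexFold E 0 0 (0, 0) le_rfl le_rfl (by norm_num)
      (fun e he => ⟨(hbE e he).1, (hbE e he).2.2.1, (hbE e he).2.2.2⟩)
  by_cases hm1 : fst = 0
  · -- no empty cell touches a friend: both sides pick by empty-neighbour count alone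
    have hfe : ∀ e ∈ E, e.2.2.1 = 0 := by
      intro e he
      have h1 : e.2.2.1 ≤ mfoldC (fun e => e.2.2.1) 0 E := mfold_ge_mem _ E 0 e he
      have h2 := (hbE e he).1
      omega
    have hfn : filt = [] := by
      rw [hfilt]
      apply List.filter_eq_nil_iff.mpr
      intro e he
      simp [hfe e he]
    rw [hfn]
    simp only [List.length_nil, List.map_nil, List.getD_nil]
    norm_num
    rw [tripleFold (fun e => e.2.2.2) E 0 0 0 le_rfl (fun e he => (hbE e he).2.2.1), hB]
    have hcongr : sfoldC (fun e => 5 * e.2.2.1 + e.2.2.2) ((0, 0), 5 * 0 + 0) E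
        = sfoldC (fun e => e.2.2.2) ((0, 0), 0) E := by
      unfold sfoldC
      norm_num
      exact PySem.List.foldl_congr_mem _ _ _ _ (by
        intro st e he
        rw [hfe e he]
        norm_num)
    rw [hcongr]
    exact ⟨rfl, rfl⟩
  · -- some candidate has a positive friend count
    have h0fst : 0 < fst := by
      have h1 : (0 : Int) ≤ mfoldC (fun e => e.2.2.1) 0 E := mfold_ge_init _ E 0
      omega
    have hex : ∃ e ∈ E, e.2.2.1 = fst := by
      rcases mfold_attained (fun e => e.2.2.1) E 0 with h | h
      · exfalso; rw [← hfstm] at h; omega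
      · rw [← hfstm] at h; exact h
    obtain ⟨ew, hewE, hewf⟩ := hex
    have hewfilt : ew ∈ filt := by
      rw [hfilt, List.mem_filter]
      exact ⟨hewE, by simp [hewf]; omega⟩
    have hfiltne : filt ≠ [] := List.ne_nil_of_mem hewfilt
    obtain ⟨e0, rest, hfl⟩ := List.exists_cons_of_ne_nil hfiltne
    set m2 := mfoldC (fun e => e.2.2.2) 0 filt with hm2def
    have hm2nn : 0 ≤ m2 := mfold_ge_init _ filt 0
    have hm2le : m2 ≤ 4 := mfold_le_bound _ 4 filt 0 (by norm_num)
      (fun e he => (hbE e (hfiltmem e he).1).2.2.2)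
    have hsle : ∀ e ∈ filt, e.2.2.2 ≤ m2 := fun e he => mfold_ge_mem _ filt 0 e he
    have hfle : ∀ e ∈ E, e.2.2.1 ≤ fst := by
      intro e he
      have h1 : e.2.2.1 ≤ mfoldC (fun e => e.2.2.1) 0 E := mfold_ge_mem _ E 0 e he
      omega
    -- the encoded maximum over all empty cells
    have hmk : mfoldC (fun e => 5 * e.2.2.1 + e.2.2.2) 0 E = 5 * fst + m2 := by
      apply le_antisymm
      · apply mfold_le_bound _ _ E 0 (by omega)
        intro e he
        by_cases hef : e.2.2.1 = fst
        · have hmem : e ∈ filt := by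
            rw [hfilt, List.mem_filter]
            exact ⟨he, by simp [hef]; omega⟩
          have h1 := hsle e hmem
          omega
        · have h1 := hfle e he
          have h2 := (hbE e he).2.2.2
          omega
      · rcases mfold_attained (fun e => e.2.2.2) filt 0 with h | ⟨e2, he2, hs2⟩
        · -- m2 = 0: any maximal-f element attains 5·fst
          have hme0 : e0 ∈ filt := hfl ▸ List.mem_cons_self
          have h1 := hsle e0 hme0
          have h2 := (hbE e0 (hfiltmem e0 hme0).1).2.2.1
          have hf0 : e0.2.2.1 = fst := ((hfiltmem e0 hme0).2.2).symm
          have h3 : 5 * e0.2.2.1 + e0.2.2.2 ≤ mfoldC (fun e => 5 * e.2.2.1 + e.2.2.2) 0 E :=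
            mfold_ge_mem _ E 0 e0 (hfiltmem e0 hme0).1
          omega
        · have hf2 : e2.2.2.1 = fst := ((hfiltmem e2 he2).2.2).symm
          have h3 : 5 * e2.2.2.1 + e2.2.2.2 ≤ mfoldC (fun e => 5 * e.2.2.1 + e.2.2.2) 0 E :=
            mfold_ge_mem _ E 0 e2 (hfiltmem e2 he2).1
          omega
    -- B's pick, as a first-match over the candidate list
    rw [hB]
    have h00 : (5 * (0 : Int) + 0) = 0 := by norm_num
    rw [h00]
    have hkey : (sfoldC (fun e => 5 * e.2.2.1 + e.2.2.2) ((0, 0), 0) E).1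
        = match filt.find? (fun e => decide (e.2.2.2 = m2)) with
          | none => ((0, 0) : Int × Int)
          | some e => (e.1, e.2.1) := by
      rw [sfold_find]
      have hp : E.find? (fun e => decide (mfoldC (fun e => 5 * e.2.2.1 + e.2.2.2) 0 E
            = 5 * e.2.2.1 + e.2.2.2 ∧ 0 < 5 * e.2.2.1 + e.2.2.2))
          = E.find? (fun a => decide (decide (a.2.2.1 ≠ 0 ∧ fst = a.2.2.1) = true
              ∧ decide (a.2.2.2 = m2) = true)) := by
        apply find?_congr_mem
        intro e he
        have h1 := hfle e he
        have h2 := hbE e he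
        rw [hmk]
        simp only [decide_eq_decide, decide_eq_true_eq]
        omega
      rw [hp, ← List.find?_filter, ← hfilt]
      cases filt.find? (fun e => decide (e.2.2.2 = m2)) <;> rfl
    rw [hkey]
    by_cases hlen : filt.length = 1 ∧ filt.length = 1
    · -- exactly one candidate: A's shortcut, B finds the same cell
      rw [if_pos hlen]
      have hrest : rest = [] := by
        have := hlen.1
        rw [hfl] at this
        simp at this
        simpa using this
      rw [hrest] at hfl
      have hme0 : e0 ∈ filt := hfl ▸ List.mem_cons_self
      have hm2e0 : e0.2.2.2 = m2 := by
        have h1 : e0.2.2.2 ≤ m2 := hsle e0 hme0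
        have h2 : m2 ≤ e0.2.2.2 := by
          rw [hm2def, hfl]
          simp only [mfoldC, List.foldl_cons, List.foldl_nil]
          have := (hbE e0 (hfiltmem e0 hme0).1).2.2.1
          omega
        omega
      rw [hfl]
      simp [hm2e0]
    · rw [if_neg hlen, if_neg (by simp [hfl])]
      -- A's tie-break loop over the candidates, as a strict argmax
      rw [rangeGetD2Fold (fun x => x.1) (fun x => x.2.1)
        (fun (st : Int × Int × Int) nr nc =>
          if countB table nr nc [-1] ≠ 0 ∧ st.2.2 < countB table nr nc [-1]
          then (nr, nc, countB table nr nc [-1]) else st) filt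
        ((List.map (fun x => x.1) filt).getD 0 0, (List.map (fun x => x.2.1) filt).getD 0 0, 0)]
      have hc2 : filt.foldl (fun (st : Int × Int × Int) e =>
            if countB table e.1 e.2.1 [-1] ≠ 0 ∧ st.2.2 < countB table e.1 e.2.1 [-1]
            then (e.1, e.2.1, countB table e.1 e.2.1 [-1]) else st)
            ((List.map (fun x => x.1) filt).getD 0 0, (List.map (fun x => x.2.1) filt).getD 0 0, 0)
          = filt.foldl (fun (st : Int × Int × Int) e =>
            if e.2.2.2 ≠ 0 ∧ st.2.2 < e.2.2.2 then (e.1, e.2.1, e.2.2.2) else st)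
            ((List.map (fun x => x.1) filt).getD 0 0, (List.map (fun x => x.2.1) filt).getD 0 0, 0) :=
        PySem.List.foldl_congr_mem _ _ _ _ (by
          intro st e he
          rw [(mem_cellsOf table F e (hE ▸ (hfiltmem e he).1)).2])
      rw [hc2, tripleFold (fun e => e.2.2.2) filt _ _ 0 le_rfl
        (fun e he => (hbE e (hfiltmem e he).1).2.2.1), sfold_find]
      rw [hfl]
      simp only [List.map_cons, ← hfl]
      by_cases hm2z : m2 = 0
      · -- no candidate touches an empty seat: both keep the first candidate
        have hnone : filt.find? (fun e => decide (mfoldC (fun e => e.2.2.2) 0 filt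
            = e.2.2.2 ∧ 0 < e.2.2.2)) = none := by
          apply List.find?_eq_none.mpr
          intro e he
          have h1 := hsle e he
          simp only [decide_eq_true_eq, not_and]
          rw [← hm2def]
          omega
        have hsome : filt.find? (fun e => decide (e.2.2.2 = m2)) = some e0 := by
          rw [hfl]
          apply List.find?_cons_of_pos
          have h1 : e0.2.2.2 ≤ m2 := hsle e0 (hfl ▸ List.mem_cons_self)
          have h2 := (hbE e0 (hfiltmem e0 (hfl ▸ List.mem_cons_self)).1).2.2.1
          simp only [decide_eq_true_eq]
          omega
        rw [← hm2def] at hnone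
        rw [hnone, hsome]
        simp [hfl]
      · -- some candidate does: both pick the first candidate attaining the maximum
        have hpr : filt.find? (fun e => decide (mfoldC (fun e => e.2.2.2) 0 filt
            = e.2.2.2 ∧ 0 < e.2.2.2)) = filt.find? (fun e => decide (e.2.2.2 = m2)) := by
          apply find?_congr_mem
          intro e he
          simp only [decide_eq_decide]
          rw [← hm2def]
          omega
        rw [← hm2def] at hpr
        rw [hpr]
        rcases mfold_attained (fun e => e.2.2.2) filt 0 with h | ⟨e2, he2, hs2⟩
        · exfalso
          rw [← hm2def] at h
          omega
        · cases hf : filt.find? (fun e => decide (e.2.2.2 = m2)) with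
          | none =>
            exfalso
            have := List.find?_eq_none.mp hf e2 he2
            rw [← hm2def] at hs2
            simp [hs2] at this
          | some e1 => rfl

-- placement agreement
lemma table_eq (N : Int) (input : List (List Int)) :
    input.foldl (fun table i =>
      let pos := bfsA table i
      setCellA table (pos.getD 0 0) (pos.getD 1 0) (PySem.List.pyGetD i 0 0))
      ((PySem.List.pyRange 0 N 1).map (fun _ => (PySem.List.pyRange 0 N 1).map (fun _ => (-1 : Int))))
    = input.foldl (fun table s =>
      let rc := chooseB table s
      setCellB table rc.1 rc.2 (PySem.List.pyGetD s 0 0))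
      ((PySem.List.pyRange 0 N 1).map (fun _ => (PySem.List.pyRange 0 N 1).map (fun _ => (-1 : Int)))) := by
  apply PySem.List.foldl_congr_mem
  intro table i _
  simp only [bfs_eq, setCellA, setCellB, List.getD]
  rfl

theorem answer_eq_alt (N : Int) (input : List (List Int)) :
    answer N input = answer_alt N input := by
  simp only [answer, answer_alt]
  rw [table_eq]
  apply PySem.List.foldl_congr_mem
  intro acc x _
  apply PySem.List.foldl_congr_mem
  intro acc2 y _
  rw [scoreCellA_find, buildDict_get?]
  cases h : (List.find? (fun s => PySem.List.pyGetD s 0 0 ==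
      ((input.foldl (fun table s =>
        setCellB table (chooseB table s).1 (chooseB table s).2 (PySem.List.pyGetD s 0 0))
        ((PySem.List.pyRange 0 N 1).map (fun _ => (PySem.List.pyRange 0 N 1).map (fun _ => (-1 : Int))))).getD x []).getD y 0) input) with
  | none => simp
  | some s => simp only [Option.map_some]; split_ifs <;> omega

-- ===== VERDICT (by name: the statement is the Claim_ definition above) =====
theorem answer_spec : Claim_equal_answer := by
  intro N input _ _
  unfold Spec_answer
  exact answer_eq_alt N input
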